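-- pv_equiv track=rewrite | github.com/Crazy-Coder8/elon_mask | string tranformation.py | string_transformation
-- ===== SOURCE A (Python) =====
-- def string_transformation(string):
--
--     d=""
--     # we have to divide a space seperated string
--     s = list(string.split(" "))
--     for i in s:
--         for j in range(len(i)):
--             if j == 0:
--                 d+=i[j]
--
--             elif ord(i[j-1]) < ord(i[j]):
--                 d+=i[j].upper()
--
--             elif ord(i[j-1]) > ord(i[j]):
--                 d+=i[j].lower()
--
--
--             elif ord(i[j-1]) == ord(i[j]):
--                 d+=i[j]
--
--
--
--
--         d+=" "
--
--     return d
--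
--     """_summary_
--     """
-- ===== SOURCE B (Python) =====
-- def string_transformation(string):
--     # One flat pass: no split, no nested loops. Each character is compared with
--     # its immediate predecessor in the original string; spaces and word-starting
--     # characters pass through unchanged, and one trailing space is appended
--     # (A emits one space per split field, which is exactly one space per ' '
--     # of the input plus a final one).
--     first = string[:1]
--     rest = [c if c == ' ' or p == ' '
--             else c.upper() if ord(p) < ord(c)
--             else c.lower() if ord(p) > ord(c)
--             else c
--             for p, c in zip(string, string[1:])]
--     return first + ''.join(rest) + ' '
-- ===== Notes on version B (the rewrite author's own statement) =====
-- stated objective: simpler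
-- what changed: Replaced split-into-words plus a nested index loop (with string += concatenation) by a single zip of the string with itself shifted by one: each character is transformed by looking at its predecessor (spaces and word starts pass through), built in one comprehension and joined, with one trailing space appended.
import Mathlib
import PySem

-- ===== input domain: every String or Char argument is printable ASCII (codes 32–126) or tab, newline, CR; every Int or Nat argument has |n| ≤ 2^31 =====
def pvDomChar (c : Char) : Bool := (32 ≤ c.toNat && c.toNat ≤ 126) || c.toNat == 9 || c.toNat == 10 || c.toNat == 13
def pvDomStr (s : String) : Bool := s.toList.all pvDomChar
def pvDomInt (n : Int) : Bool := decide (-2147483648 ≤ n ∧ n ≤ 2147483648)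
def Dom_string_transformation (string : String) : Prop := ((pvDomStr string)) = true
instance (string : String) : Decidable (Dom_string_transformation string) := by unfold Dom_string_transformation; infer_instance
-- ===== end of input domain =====

-- B replaces A's split-into-words + nested index loop by one zip-with-shift pass; objective: simpler.

-- ===== PORT A =====
def string_transformation (string : String) : String :=
  String.mk ((PySem.Chars.splitOn string.toList [' ']).foldl (fun d i =>
    ((PySem.List.pyRange 0 (PySem.List.len i)).foldl (fun d j =>
        if j == 0 then d ++ [PySem.List.pyGetD i j ' ']
        else if (PySem.List.pyGetD i (j-1) ' ').toNat < (PySem.List.pyGetD i j ' ').toNat then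
          d ++ [PySem.Chars.upperChar (PySem.List.pyGetD i j ' ')]
        else if (PySem.List.pyGetD i (j-1) ' ').toNat > (PySem.List.pyGetD i j ' ').toNat then
          d ++ [PySem.Chars.lowerChar (PySem.List.pyGetD i j ' ')]
        else if (PySem.List.pyGetD i (j-1) ' ').toNat == (PySem.List.pyGetD i j ' ').toNat then
          d ++ [PySem.List.pyGetD i j ' ']
        else d) d) ++ [' ']) [])

-- ===== PORT B =====
def string_transformation_alt (string : String) : String :=
  String.mk (PySem.List.slice string.toList none (some 1)
    ++ (List.zip string.toList (PySem.List.slice string.toList (some 1) none)).map (fun pc =>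
        if pc.2 == ' ' || pc.1 == ' ' then pc.2
        else if pc.1.toNat < pc.2.toNat then PySem.Chars.upperChar pc.2
        else if pc.1.toNat > pc.2.toNat then PySem.Chars.lowerChar pc.2
        else pc.2)
    ++ [' '])

-- ===== PRECONDITION & SPEC =====
def Spec_string_transformation (string : String) (out : String) : Prop := out = string_transformation_alt string
instance (string : String) (out : String) : Decidable (Spec_string_transformation string out) := by unfold Spec_string_transformation; infer_instance

-- ===== CLAIM (what is proved, stated in full; the proofs are below) =====
def Claim_equal_string_transformation : Prop := ∀ (string : String), Dom_string_transformation string → Spec_string_transformation string (string_transformation string)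

-- ===== LEMMAS AND PROOFS =====

-- the common per-character case step (upper if previous ord is smaller, lower if larger, else unchanged)
def pvStep (p c : Char) : Char :=
  if p.toNat < c.toNat then PySem.Chars.upperChar c
  else if p.toNat > c.toNat then PySem.Chars.lowerChar c
  else c

-- A's inner loop from index 1 on, as structural recursion (prev char is carried)
def pvFW : Char → List Char → List Char
  | _, [] => []
  | p, c :: r => pvStep p c :: pvFW c r

-- A's inner loop over one word
def pvWord : List Char → List Char
  | [] => []
  | c :: r => c :: pvFW c r

theorem pvWord_nil : pvWord [] = [] := rfl
theorem pvFW_nil (p : Char) : pvFW p [] = [] := rfl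
theorem pvWord_cons (c : Char) (r : List Char) : pvWord (c :: r) = c :: pvFW c r := rfl

-- common reference form: flat pass with optional previous char (none = at a word start)
def pvF : Option Char → List Char → List Char
  | _, [] => [' ']
  | p, c :: r =>
    if c = ' ' then ' ' :: pvF none r
    else match p with
      | none => c :: pvF (some c) r
      | some q => pvStep q c :: pvF (some c) r

-- head and tail of split(" ") as structural recursions
def pvWh : List Char → List Char
  | [] => []
  | c :: r => if c = ' ' then [] else c :: pvWh r

def pvWt : List Char → List (List Char)
  | [] => []
  | c :: r => if c = ' ' then pvWh r :: pvWt r else pvWt r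

-- B's zip-map as an adjacent-pair recursion
def pvAm : Char → List Char → List Char
  | _, [] => []
  | p, c :: r => (if c = ' ' ∨ p = ' ' then c else pvStep p c) :: pvAm c r

theorem pv_go_spec (fuel : Nat) : ∀ (l cur : List Char) (acc : List (List Char)),
    l.length < fuel →
    PySem.Chars.splitOn.go [' '] fuel l cur acc
      = acc.reverse ++ (cur.reverse ++ pvWh l) :: pvWt l := by
  induction fuel with
  | zero => intro l cur acc h; omega
  | succ f ih =>
    intro l cur acc h
    cases l with
    | nil => simp [PySem.Chars.splitOn.go, pvWh, pvWt]
    | cons c rest =>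
      by_cases hc : c = ' '
      · subst hc
        rw [show PySem.Chars.splitOn.go [' '] (f+1) (' ' :: rest) cur acc
              = PySem.Chars.splitOn.go [' '] f rest [] (cur.reverse :: acc) by
            simp [PySem.Chars.splitOn.go, List.isPrefixOf]]
        rw [ih rest [] (cur.reverse :: acc) (by simpa using Nat.lt_of_succ_lt_succ h)]
        simp [pvWh, pvWt]
      · have hc' : ¬ (' ' = c) := fun hx => hc hx.symm
        rw [show PySem.Chars.splitOn.go [' '] (f+1) (c :: rest) cur acc
              = PySem.Chars.splitOn.go [' '] f rest (c :: cur) acc by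
            simp [PySem.Chars.splitOn.go, List.isPrefixOf, hc']]
        rw [ih rest (c :: cur) acc (by simpa using Nat.lt_of_succ_lt_succ h)]
        simp [pvWh, pvWt, hc]

theorem pv_splitOn_space (cs : List Char) :
    PySem.Chars.splitOn cs [' '] = (pvWh cs) :: pvWt cs := by
  rw [show PySem.Chars.splitOn cs [' ']
        = PySem.Chars.splitOn.go [' '] (cs.length + 1) cs [] [] from rfl]
  rw [pv_go_spec (cs.length + 1) cs [] [] (by omega)]
  simp

theorem pvFW_length (r : List Char) : ∀ p, (pvFW p r).length = r.length := by
  induction r with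
  | nil => intro p; rfl
  | cons c t ih => intro p; simp [pvFW, ih]

theorem pvFW_getElem (r : List Char) : ∀ (p : Char) (k : Nat) (hk : k < r.length),
    (pvFW p r)[k]'(by rw [pvFW_length]; exact hk)
      = pvStep ((p :: r)[k]'(by simpa using Nat.lt_succ_of_lt hk))
               (r[k]'hk) := by
  induction r with
  | nil => intro p k hk; simp at hk
  | cons c t ih =>
    intro p k hk
    cases k with
    | zero => simp [pvFW]
    | succ m =>
      have hm : m < t.length := by simpa using Nat.lt_of_succ_lt_succ hk
      simp only [pvFW, List.getElem_cons_succ]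
      exact ih c m hm

theorem pv_inner_eq (w : List Char) (d : List Char) :
    (PySem.List.pyRange 0 (PySem.List.len w)).foldl (fun d j =>
        if j == 0 then d ++ [PySem.List.pyGetD w j ' ']
        else if (PySem.List.pyGetD w (j-1) ' ').toNat < (PySem.List.pyGetD w j ' ').toNat then
          d ++ [PySem.Chars.upperChar (PySem.List.pyGetD w j ' ')]
        else if (PySem.List.pyGetD w (j-1) ' ').toNat > (PySem.List.pyGetD w j ' ').toNat then
          d ++ [PySem.Chars.lowerChar (PySem.List.pyGetD w j ' ')]
        else if (PySem.List.pyGetD w (j-1) ' ').toNat == (PySem.List.pyGetD w j ' ').toNat then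
          d ++ [PySem.List.pyGetD w j ' ']
        else d) d
      = d ++ pvWord w := by
  have hbody : ∀ (acc : List Char), ∀ j ∈ PySem.List.pyRange 0 (PySem.List.len w),
      (if j == 0 then acc ++ [PySem.List.pyGetD w j ' ']
        else if (PySem.List.pyGetD w (j-1) ' ').toNat < (PySem.List.pyGetD w j ' ').toNat then
          acc ++ [PySem.Chars.upperChar (PySem.List.pyGetD w j ' ')]
        else if (PySem.List.pyGetD w (j-1) ' ').toNat > (PySem.List.pyGetD w j ' ').toNat then
          acc ++ [PySem.Chars.lowerChar (PySem.List.pyGetD w j ' ')]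
        else if (PySem.List.pyGetD w (j-1) ' ').toNat == (PySem.List.pyGetD w j ' ').toNat then
          acc ++ [PySem.List.pyGetD w j ' ']
        else acc)
      = acc ++ [if j == 0 then PySem.List.pyGetD w j ' '
                else pvStep (PySem.List.pyGetD w (j-1) ' ') (PySem.List.pyGetD w j ' ')] := by
    intro acc j _
    by_cases h0 : j = 0
    · simp [h0]
    · simp only [beq_iff_eq, h0, if_false, pvStep, gt_iff_lt]
      split_ifs with h1 h2 h3 <;> first | rfl | omega
  rw [PySem.List.foldl_congr_mem _ _ _ d hbody]
  rw [PySem.List.foldl_append_singleton_eq_map]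
  congr 1
  rw [show PySem.List.len w = ((w.length : Nat) : Int) from rfl,
      PySem.List.pyRange_zero_natCast, List.map_map]
  apply List.ext_getElem
  · cases w with
    | nil => simp [pvWord_nil]
    | cons c t => simp [pvWord_cons, pvFW_length]
  · intro k h1 h2
    simp only [List.getElem_map, List.getElem_range, Function.comp_apply]
    have hk : k < w.length := by simpa using h1
    cases w with
    | nil => simp at hk
    | cons c t =>
      cases k with
      | zero =>
        simp [pvWord_cons]
      | succ m =>
        have hm : m < t.length := by simpa using Nat.lt_of_succ_lt_succ hk
        rw [if_neg (by simp only [beq_iff_eq]; push_cast; omega)]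
        have hsub : (((m+1 : Nat) : Int) - 1) = ((m : Nat) : Int) := by push_cast; ring
        rw [hsub, PySem.List.pyGetD_natCast, PySem.List.pyGetD_natCast]
        simp only [pvWord_cons, List.getElem_cons_succ]
        rw [pvFW_getElem t c m hm]
        have e1 : (c :: t).getD m ' ' = (c :: t)[m]'(by simpa using Nat.lt_succ_of_lt hm) :=
          List.getD_eq_getElem _ _ _
        have e2 : (c :: t).getD (m+1) ' ' = t[m]'hm := by
          rw [List.getD_cons_succ]
          exact List.getD_eq_getElem _ _ _
        rw [e1, e2]

theorem pv_split_F (cs : List Char) : ∀ (p : Option Char),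
    ((match p with
      | none => pvWord (pvWh cs)
      | some q => pvFW q (pvWh cs)) ++ [' '])
      ++ (pvWt cs).flatMap (fun w => pvWord w ++ [' ']) = pvF p cs := by
  induction cs with
  | nil => intro p; cases p <;> simp [pvWh, pvWt, pvWord_nil, pvFW, pvF]
  | cons c r ih =>
    intro p
    by_cases hc : c = ' '
    · subst hc
      have hmain := ih none
      simp only at hmain
      have hWh : pvWh (' ' :: r) = [] := by simp [pvWh]
      have hWt : pvWt (' ' :: r) = pvWh r :: pvWt r := by simp [pvWt]
      cases p with
      | none =>
        rw [hWh, hWt, pvWord_nil, List.flatMap_cons,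
          show pvF none (' ' :: r) = ' ' :: pvF none r by simp [pvF], ← hmain]
        simp
      | some q =>
        dsimp only
        rw [hWh, hWt, pvFW_nil q, List.flatMap_cons,
          show pvF (some q) (' ' :: r) = ' ' :: pvF none r by simp [pvF], ← hmain]
        simp
    · have hsome := ih (some c)
      simp only at hsome
      have hWh : pvWh (c :: r) = c :: pvWh r := by simp [pvWh, hc]
      have hWt : pvWt (c :: r) = pvWt r := by simp [pvWt, hc]
      cases p with
      | none =>
        rw [hWh, hWt, pvWord_cons,
          show pvF none (c :: r) = c :: pvF (some c) r by simp [pvF, hc], ← hsome]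
        simp
      | some q =>
        dsimp only
        rw [hWh, hWt,
          show pvFW q (c :: pvWh r) = pvStep q c :: pvFW c (pvWh r) from rfl,
          show pvF (some q) (c :: r) = pvStep q c :: pvF (some c) r by simp [pvF, hc], ← hsome]
        simp

theorem pv_A_eq (s : String) :
    string_transformation s = String.mk (pvF none s.toList) := by
  unfold string_transformation
  rw [pv_splitOn_space]
  rw [PySem.List.foldl_congr_mem _
        _ (fun d i => d ++ (pvWord i ++ [' '])) []
        (fun acc i _ => by rw [pv_inner_eq]; simp)]
  rw [PySem.List.foldl_append_eq_flatMap]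
  rw [List.nil_append, List.flatMap_cons]
  congr 1
  have h := pv_split_F s.toList none
  simp only at h
  simpa using h

theorem pv_zip_am (r : List Char) : ∀ (c : Char),
    (List.zip (c :: r) r).map (fun pc =>
      if pc.2 == ' ' || pc.1 == ' ' then pc.2
      else if pc.1.toNat < pc.2.toNat then PySem.Chars.upperChar pc.2
      else if pc.1.toNat > pc.2.toNat then PySem.Chars.lowerChar pc.2
      else pc.2) = pvAm c r := by
  induction r with
  | nil => intro c; rfl
  | cons d t ih =>
    intro c
    simp only [List.zip_cons_cons, List.map_cons, pvAm, ih d]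
    congr 1
    by_cases h1 : d = ' ' ∨ c = ' '
    · rw [if_pos h1, if_pos (by simpa using h1)]
    · rw [if_neg h1, if_neg (by simpa using h1)]
      simp [pvStep]

theorem pv_am_F (r : List Char) : ∀ (c : Char),
    pvAm c r ++ [' '] = pvF (if c = ' ' then none else some c) r := by
  induction r with
  | nil => intro c; by_cases hc : c = ' ' <;> simp [pvAm, pvF]
  | cons d t ih =>
    intro c
    by_cases hd : d = ' '
    · subst hd
      have h := ih ' '
      rw [if_pos rfl] at h
      by_cases hc : c = ' ' <;> simp [pvAm, pvF, hc, h]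
    · have h := ih d
      rw [if_neg hd] at h
      by_cases hc : c = ' '
      · subst hc
        simp [pvAm, pvF, hd, h]
      · simp [pvAm, pvF, hd, hc, h]

theorem pv_B_eq (s : String) :
    string_transformation_alt s = String.mk (pvF none s.toList) := by
  unfold string_transformation_alt
  rw [PySem.List.slice_to _ (by omega), PySem.List.slice_from _ (by omega)]
  congr 1
  cases hcs : s.toList with
  | nil => simp [pvF]
  | cons c r =>
    simp only [Int.toNat_one, List.take_succ_cons, List.take_zero, List.drop_succ_cons,
      List.drop_zero, List.cons_append, List.nil_append]
    rw [pv_zip_am r c, pv_am_F r c]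
    by_cases hc : c = ' '
    · subst hc; simp [pvF]
    · simp [pvF, hc]

-- ===== VERDICT (by name: the statement is the Claim_ definition above) =====
theorem string_transformation_spec : Claim_equal_string_transformation := by
  intro s _
  unfold Spec_string_transformation
  rw [pv_A_eq, pv_B_eq]
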